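-- pv_equiv track=rewrite | github.com/bitcoin-playground/easy-miner | block_builder.py | tx_encode_coinbase_height
-- ===== SOURCE A (Python) =====
-- def tx_encode_coinbase_height(height: int) -> str:
--     """
--     Codifica l'altezza del blocco secondo BIP34 (formato CScriptNum) per includerla
--     nello scriptSig della transazione coinbase.
--     """
--     if height < 0:
--         raise ValueError("L'altezza del blocco deve essere maggiore o uguale a 0.")
--     if height == 0:
--         return "00"
--     result = bytearray()
--     v = height
--     while v:
--         result.append(v & 0xff)
--         v >>= 8
--     # Se il bit più significativo dell'ultimo byte è 1, aggiungi un byte 0x00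
--     if result and (result[-1] & 0x80):
--         result.append(0x00)
--     return f"{len(result):02x}" + result.hex()
-- ===== SOURCE B (Python) =====
-- def tx_encode_coinbase_height(height: int) -> str:
--     """BIP34 CScriptNum encoding of the block height: closed-form length via
--     bit_length + to_bytes instead of a byte-emitting while loop."""
--     if height < 0:
--         raise ValueError("L'altezza del blocco deve essere maggiore o uguale a 0.")
--     if height == 0:
--         return "00"
--     length = (height.bit_length() + 7) // 8
--     b = bytearray(height.to_bytes(length, "little"))
--     if b[-1] & 0x80:
--         b.append(0x00)
--     return f"{len(b):02x}" + b.hex()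
-- ===== Notes on version B (the rewrite author's own statement) =====
-- stated objective: simpler
-- what changed: Replaces the byte-emitting while loop with a closed-form byte count ((bit_length()+7)//8) and a single to_bytes(..., 'little') call, keeping the same 0x80 sign-byte fixup and '00' case.
import Mathlib
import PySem

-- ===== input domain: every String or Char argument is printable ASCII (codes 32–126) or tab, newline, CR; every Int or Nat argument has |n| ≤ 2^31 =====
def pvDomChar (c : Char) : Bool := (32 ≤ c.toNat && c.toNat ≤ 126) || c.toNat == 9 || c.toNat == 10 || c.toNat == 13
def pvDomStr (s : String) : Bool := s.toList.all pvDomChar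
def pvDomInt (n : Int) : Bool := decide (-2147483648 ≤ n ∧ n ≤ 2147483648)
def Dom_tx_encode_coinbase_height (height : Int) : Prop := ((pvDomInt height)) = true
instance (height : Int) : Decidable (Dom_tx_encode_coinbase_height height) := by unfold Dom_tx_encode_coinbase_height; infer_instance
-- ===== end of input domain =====

-- B replaces A's byte-emitting while loop by a closed-form byte count ((bit_length()+7)//8)
-- and a single little-endian to_bytes conversion (objective: simpler).

-- shared hex formatting helper: f"{n:02x}" for a byte 0 ≤ n < 256 (exact on that range)
def pvHexDigit (n : Nat) : Char := if n < 10 then Char.ofNat (48 + n) else Char.ofNat (87 + n)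
def pvByteHex (n : Nat) : String := String.ofList [pvHexDigit (n / 16), pvHexDigit (n % 16)]

-- ===== PORT A =====
-- the `while v:` loop; v ≥ 0 throughout (height ≥ 0 under Pre_), so Nat `%`/`/` are exact for `v & 0xff`, `v >>= 8`
def pvLoopA (v : Nat) : List Nat :=
  if h : v = 0 then []
  else (v % 256) :: pvLoopA (v / 256)
decreasing_by exact Nat.div_lt_self (Nat.pos_of_ne_zero h) (by norm_num)

def tx_encode_coinbase_height (height : Int) : String :=
  if height < 0 then ""            -- Python raises ValueError here; excluded by Pre_
  else if height = 0 then "00"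
  else
    let result := pvLoopA height.toNat
    -- `if result and (result[-1] & 0x80):` — bytes are < 256, so the 0x80 bit is set iff last byte ≥ 128
    let result := if result ≠ [] ∧ 128 ≤ result.getLastD 0 then result ++ [0] else result
    pvByteHex result.length ++ String.join (result.map pvByteHex)

-- ===== PORT B =====
-- height.to_bytes(len, 'little') = the list [height >> 8*i & 0xff for i in range(len)] (its contract for nonneg ints)
def tx_encode_coinbase_height_alt (height : Int) : String :=
  if height < 0 then ""            -- Python raises ValueError here; excluded by Pre_
  else if height = 0 then "00"
  else
    let v := height.toNat
    let len := (PySem.Int.bitLength height + 7) / 8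
    let b := (List.range len).map (fun i => v / 256 ^ i % 256)
    let b := if 128 ≤ b.getLastD 0 then b ++ [0] else b
    pvByteHex b.length ++ String.join (b.map pvByteHex)

-- ===== PRECONDITION & SPEC =====
-- Pre_ excludes exactly the inputs where the Python A raises ValueError: negative heights.
def Pre_tx_encode_coinbase_height (height : Int) : Prop := 0 ≤ height
instance (height : Int) : Decidable (Pre_tx_encode_coinbase_height height) := by unfold Pre_tx_encode_coinbase_height; infer_instance
def pvWitness_tx_encode_coinbase_height : Int := 128

def Spec_tx_encode_coinbase_height (height : Int) (out : String) : Prop := out = tx_encode_coinbase_height_alt height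
instance (height : Int) (out : String) : Decidable (Spec_tx_encode_coinbase_height height out) := by unfold Spec_tx_encode_coinbase_height; infer_instance

-- ===== CLAIM (what is proved, stated in full; the proofs are below) =====
def Claim_equal_tx_encode_coinbase_height : Prop := ∀ (height : Int), Dom_tx_encode_coinbase_height height → Pre_tx_encode_coinbase_height height → Spec_tx_encode_coinbase_height height (tx_encode_coinbase_height height)

-- ===== LEMMAS AND PROOFS =====

-- bitLength is characterised by its power-of-two bracket
lemma pv_bl_eq (v k : Nat) (h1 : 2 ^ (k - 1) ≤ v) (h2 : v < 2 ^ k) (hk : 1 ≤ k) :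
    PySem.Int.bitLength (v : Int) = k := by
  have hv0 : v ≠ 0 := by
    have : 1 ≤ 2 ^ (k - 1) := Nat.one_le_two_pow
    omega
  have hlt : v < 2 ^ PySem.Int.bitLength (v : Int) := by
    simpa using PySem.Int.lt_two_pow_bitLength (v : Int)
  have hle : 2 ^ (PySem.Int.bitLength (v : Int) - 1) ≤ v := by
    simpa using PySem.Int.two_pow_bitLength_le (v : Int) (by exact_mod_cast hv0)
  set b := PySem.Int.bitLength (v : Int) with hb
  have hb1 : 1 ≤ b := by
    by_contra h
    have : b = 0 := by omega
    rw [this] at hlt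
    simp at hlt
    omega
  have h1' : b - 1 < k := by
    have := lt_of_le_of_lt hle h2
    exact (Nat.pow_lt_pow_iff_right (by norm_num)).mp this
  have h2' : k - 1 < b := by
    have := lt_of_le_of_lt h1 hlt
    exact (Nat.pow_lt_pow_iff_right (by norm_num)).mp this
  omega

-- A's while loop produces exactly B's closed-form little-endian byte list
lemma pv_loopA_eq : ∀ v : Nat, 0 < v →
    pvLoopA v = (List.range ((PySem.Int.bitLength (v : Int) + 7) / 8)).map (fun i => v / 256 ^ i % 256) := by
  intro v
  induction v using Nat.strong_induction_on with
  | _ v ih =>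
    intro hv
    have hv' : v ≠ 0 := by omega
    have hlt : v < 2 ^ PySem.Int.bitLength (v : Int) := by
      simpa using PySem.Int.lt_two_pow_bitLength (v : Int)
    have hle : 2 ^ (PySem.Int.bitLength (v : Int) - 1) ≤ v := by
      simpa using PySem.Int.two_pow_bitLength_le (v : Int) (by exact_mod_cast hv')
    set k := PySem.Int.bitLength (v : Int) with hk
    have hk1 : 1 ≤ k := by
      by_contra h
      have : k = 0 := by omega
      rw [this] at hlt; simp at hlt; omega
    by_cases h256 : v < 256
    · have hk8 : k ≤ 8 := by
        by_contra h
        have h9 : 9 ≤ k := by omega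
        have : (2:Nat) ^ 8 ≤ 2 ^ (k - 1) := Nat.pow_le_pow_right (by norm_num) (by omega)
        norm_num at this; omega
      have hlen : (k + 7) / 8 = 1 := by omega
      rw [pvLoopA, hlen]
      simp only [hv', dite_false, List.range_one, List.map, pow_zero, Nat.div_one]
      have hdiv : v / 256 = 0 := Nat.div_eq_of_lt h256
      rw [hdiv, pvLoopA]
      simp
    · have h256' : 256 ≤ v := by omega
      have hvpos : 0 < v / 256 := Nat.div_pos h256' (by norm_num)
      have hk9 : 9 ≤ k := by
        by_contra h
        have : (2:Nat) ^ k ≤ 2 ^ 8 := Nat.pow_le_pow_right (by norm_num) (by omega)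
        norm_num at this; omega
      have hbl' : PySem.Int.bitLength ((v / 256 : Nat) : Int) = k - 8 := by
        apply pv_bl_eq
        · rw [Nat.le_div_iff_mul_le (by norm_num : 0 < 256)]
          have he : 2 ^ (k - 8 - 1) * 256 = 2 ^ (k - 1) := by
            rw [show (256:Nat) = 2 ^ 8 by norm_num, ← pow_add]
            congr 1; omega
          rw [he]; exact hle
        · rw [Nat.div_lt_iff_lt_mul (by norm_num : 0 < 256)]
          have he : 2 ^ (k - 8) * 256 = 2 ^ k := by
            rw [show (256:Nat) = 2 ^ 8 by norm_num, ← pow_add]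
            congr 1; omega
          rw [he]; exact hlt
        · omega
      have ihr := ih (v / 256) (Nat.div_lt_self hv (by norm_num)) hvpos
      rw [pvLoopA]
      simp only [hv', dite_false]
      rw [ihr, hbl']
      have hlen : (k + 7) / 8 = (k - 8 + 7) / 8 + 1 := by omega
      rw [hlen, List.range_succ_eq_map]
      simp only [List.map_cons, List.map_map, pow_zero, Nat.div_one]
      congr 1
      apply List.map_congr_left
      intro i _
      simp only [Function.comp]
      rw [Nat.div_div_eq_div_mul, ← pow_succ']

-- ===== VERDICT (by name: the statement is the Claim_ definition above) =====
theorem tx_encode_coinbase_height_spec : Claim_equal_tx_encode_coinbase_height := by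
  intro height _ hpre
  unfold Spec_tx_encode_coinbase_height tx_encode_coinbase_height tx_encode_coinbase_height_alt
  unfold Pre_tx_encode_coinbase_height at hpre
  by_cases h0 : height = 0
  · simp [h0]
  · have hpos : 0 < height := by omega
    have hnneg : ¬ height < 0 := by omega
    simp only [hnneg, if_false, h0, if_false]
    have hcast : ((height.toNat : Nat) : Int) = height := Int.toNat_of_nonneg hpre
    have hvpos : 0 < height.toNat := by omega
    have hloop := pv_loopA_eq height.toNat hvpos
    rw [hcast] at hloop
    rw [hloop]
    have hne : (List.range ((PySem.Int.bitLength height + 7) / 8)).map (fun i => height.toNat / 256 ^ i % 256) ≠ [] := by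
      have hk1 : 1 ≤ PySem.Int.bitLength height := by
        by_contra h
        have hz : PySem.Int.bitLength height = 0 := by omega
        have hlt : height.natAbs < 2 ^ PySem.Int.bitLength height := PySem.Int.lt_two_pow_bitLength height
        rw [hz] at hlt; simp at hlt; omega
      simp [List.range_eq_nil]
      omega
    simp only [hne, ne_eq, not_false_iff, true_and]
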